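-- pv_equiv track=rewrite | github.com/henry-r18/advent-of-code-2025 | day_10/main.py | part_one
-- ===== SOURCE A (Python) =====
-- from itertools import combinations
--
-- def part_one(input: list[tuple]) -> int:
--     """Find the product of the sequences of fewest button presses
--     that result in the diagram for each line in the input."""
--     fewest_button_presses = []
--     for line in input:
--         diagram, buttons, _ = line
--         found_target_state = False
--         # First try 1 button, then 2, then 3, etc
--         for available_button_count in range(1, len(buttons) + 1):
--             for attempt in combinations(buttons, available_button_count):
--                 target_state = set()
--                 for button in attempt:
--                     target_state ^= button
--                 found_target_state = target_state == diagram
--                 if found_target_state: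
--                     fewest_button_presses.append(available_button_count)
--                     break
--             if found_target_state:
--                 break
--     return sum(fewest_button_presses)
-- ===== SOURCE B (Python) =====
-- def part_one(input: list[tuple]) -> int:
--     """Find the product of the sequences of fewest button presses
--     that result in the diagram for each line in the input."""
--     total = 0
--     for diagram, buttons, _ in input:
--         # one pass over the buttons builds every subset's XOR with its size
--         acc = [(frozenset(), 0)]
--         for b in buttons:
--             acc = acc + [(x ^ frozenset(b), c + 1) for (x, c) in acc]
--         best = None
--         for x, c in acc:
--             if x == diagram and c != 0 and (best is None or c < best):
--                 best = c
--         total += best if best is not None else 0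
--     return total
-- ===== Notes on version B (the rewrite author's own statement) =====
-- stated objective: alternative
-- what changed: A enumerates button combinations size by size (1, 2, ...) with an early exit; B makes a single pass over the buttons, folding up the full powerset of (XOR-value, subset-size) pairs, and then scans once for the minimum size whose XOR equals the diagram.
import Mathlib
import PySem

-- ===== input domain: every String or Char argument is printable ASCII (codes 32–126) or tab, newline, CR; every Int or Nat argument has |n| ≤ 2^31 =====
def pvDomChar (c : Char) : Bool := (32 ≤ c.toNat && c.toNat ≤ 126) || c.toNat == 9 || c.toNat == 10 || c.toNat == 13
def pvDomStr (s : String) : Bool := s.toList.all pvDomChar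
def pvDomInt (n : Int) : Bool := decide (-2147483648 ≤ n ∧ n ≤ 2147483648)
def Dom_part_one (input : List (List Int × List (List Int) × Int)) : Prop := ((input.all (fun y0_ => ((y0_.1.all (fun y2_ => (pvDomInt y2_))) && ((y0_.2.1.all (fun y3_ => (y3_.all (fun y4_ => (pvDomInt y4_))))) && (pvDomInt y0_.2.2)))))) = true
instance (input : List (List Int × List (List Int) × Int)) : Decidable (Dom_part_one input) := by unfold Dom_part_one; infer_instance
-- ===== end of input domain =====

-- B replaces A's per-size enumeration of button combinations (with early exit) by one
-- pass that folds the powerset of XOR-values with subset sizes and then takes the minimum: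
-- a different algorithm of similar cost ("alternative", no speed claim).

-- ===== PORT A =====
-- itertools.combinations(buttons, k): all length-k subsequences, in order
def pvCombos {α : Type} : Nat → List α → List (List α)
  | 0, _ => [[]]
  | _+1, [] => []
  | k+1, x :: xs => (pvCombos k xs).map (x :: ·) ++ pvCombos (k+1) xs

-- target_state = set(); for button in attempt: target_state ^= button
def pvXor (att : List (PySem.Set Int)) : PySem.Set Int :=
  att.foldl PySem.Set.symmDiff PySem.Set.empty

-- the two inner loops with their breaks: first k in range(1, len(buttons)+1) for which
-- some combination of k buttons XORs to the diagram (none = nothing appended)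
def pvLineA (d : PySem.Set Int) (bs : List (PySem.Set Int)) : Option Int :=
  (PySem.List.pyRange 1 ((bs.length : Int) + 1) 1).find?
    (fun k => (pvCombos k.toNat bs).any (fun att => PySem.Set.equal (pvXor att) d))

def part_one (input : List (List Int × List (List Int) × Int)) : Int :=
  (input.foldl (fun fbp line =>
      match pvLineA (PySem.Set.ofList line.1) (line.2.1.map PySem.Set.ofList) with
      | some k => fbp ++ [k]
      | none => fbp) ([] : List Int)).sum

-- ===== PORT B =====
-- acc = acc + [(x ^ b, c + 1) for (x, c) in acc]
def pvStep (acc : List (PySem.Set Int × Int)) (b : PySem.Set Int) : List (PySem.Set Int × Int) :=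
  acc ++ acc.map (fun p => (PySem.Set.symmDiff p.1 b, p.2 + 1))

-- best is None or c < best
def pvBetter (best : Option Int) (c : Int) : Bool :=
  match best with
  | none => true
  | some v => decide (c < v)

def pvLineB (d : PySem.Set Int) (bs : List (PySem.Set Int)) : Option Int :=
  let acc := bs.foldl pvStep [(PySem.Set.empty, (0 : Int))]
  acc.foldl (fun best p =>
      if PySem.Set.equal p.1 d && (p.2 != 0) && pvBetter best p.2 then some p.2 else best)
    none

def part_one_alt (input : List (List Int × List (List Int) × Int)) : Int :=
  input.foldl (fun total line =>
    total + (pvLineB (PySem.Set.ofList line.1) (line.2.1.map PySem.Set.ofList)).getD 0) 0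

-- ===== PRECONDITION & SPEC =====
def Spec_part_one (input : List (List Int × List (List Int) × Int)) (out : Int) : Prop := out = part_one_alt input
instance (input : List (List Int × List (List Int) × Int)) (out : Int) : Decidable (Spec_part_one input out) := by unfold Spec_part_one; infer_instance

-- ===== CLAIM (what is proved, stated in full; the proofs are below) =====
def Claim_equal_part_one : Prop := ∀ (input : List (List Int × List (List Int) × Int)), Dom_part_one input → Spec_part_one input (part_one input)

-- ===== LEMMAS AND PROOFS =====


theorem pv_mem_combos {α : Type} (k : Nat) (bs : List α) (att : List α) :
    att ∈ pvCombos k bs ↔ att.Sublist bs ∧ att.length = k := by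
  induction bs generalizing k att with
  | nil =>
    cases k with
    | zero => simp [pvCombos, List.sublist_nil]
    | succ k =>
      simp only [pvCombos]
      constructor
      · intro h; simp at h
      · rintro ⟨h, hl⟩; rw [List.sublist_nil.mp h] at hl; simp at hl
  | cons b bs ih =>
    cases k with
    | zero =>
      simp only [pvCombos, List.mem_singleton]
      constructor
      · rintro rfl; exact ⟨List.nil_sublist _, rfl⟩
      · rintro ⟨_, h⟩; exact List.length_eq_zero_iff.mp h
    | succ k =>
      simp only [pvCombos, List.mem_append, List.mem_map]
      constructor
      · rintro (⟨t, ht, rfl⟩ | h)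
        · obtain ⟨hs, hl⟩ := (ih k t).mp ht
          exact ⟨List.Sublist.cons₂ b hs, by simp [hl]⟩
        · obtain ⟨hs, hl⟩ := (ih (k+1) att).mp h
          exact ⟨List.Sublist.cons b hs, hl⟩
      · rintro ⟨hs, hl⟩
        rcases List.sublist_cons_iff.mp hs with h | ⟨r, rfl, hr⟩
        · exact Or.inr ((ih (k+1) att).mpr ⟨h, hl⟩)
        · exact Or.inl ⟨r, (ih k r).mpr ⟨hr, by simpa using hl⟩, rfl⟩

theorem pv_mem_acc (bs : List (PySem.Set Int)) :
    ∀ (a0 : List (PySem.Set Int × Int)) (p : PySem.Set Int × Int),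
    p ∈ bs.foldl pvStep a0 ↔
      ∃ q ∈ a0, ∃ s : List (PySem.Set Int),
        s.Sublist bs ∧ p = (s.foldl PySem.Set.symmDiff q.1, q.2 + (s.length : Int)) := by
  induction bs with
  | nil =>
    intro a0 p
    simp only [List.foldl_nil]
    constructor
    · intro hp; exact ⟨p, hp, [], by simp⟩
    · rintro ⟨q, hq, s, hs, rfl⟩
      have : s = [] := List.sublist_nil.mp hs
      subst this; simpa using hq
  | cons b bs ih =>
    intro a0 p
    rw [List.foldl_cons, ih]
    constructor
    · rintro ⟨q, hq, s, hs, rfl⟩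
      rcases List.mem_append.mp hq with hq | hq
      · exact ⟨q, hq, s, List.Sublist.cons b hs, rfl⟩
      · obtain ⟨q0, hq0, rfl⟩ := List.mem_map.mp hq
        refine ⟨q0, hq0, b :: s, List.Sublist.cons₂ b hs, ?_⟩
        simp [List.foldl_cons]
        ring
    · rintro ⟨q, hq, s, hs, rfl⟩
      rcases List.sublist_cons_iff.mp hs with h | ⟨r, rfl, hr⟩
      · exact ⟨q, List.mem_append_left _ hq, s, h, rfl⟩
      · refine ⟨(PySem.Set.symmDiff q.1 b, q.2 + 1),
          List.mem_append_right _ (List.mem_map.mpr ⟨q, hq, rfl⟩), r, hr, ?_⟩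
        simp [List.foldl_cons]
        ring

theorem pvBetter_none (c : Int) : pvBetter none c = true := rfl
theorem pvBetter_some (v c : Int) : pvBetter (some v) c = decide (c < v) := rfl

-- the min-tracking fold: if it yields `some v`, v is a candidate and is minimal
theorem pv_best_le (d : PySem.Set Int) (acc : List (PySem.Set Int × Int)) :
    ∀ (cur : Option Int) (v : Int),
    acc.foldl (fun best p =>
        if PySem.Set.equal p.1 d && (p.2 != 0) && pvBetter best p.2 then some p.2 else best) cur
      = some v →
    (∀ p ∈ acc, (PySem.Set.equal p.1 d && (p.2 != 0)) = true → v ≤ p.2) ∧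
    (∀ c, cur = some c → v ≤ c) ∧
    (cur = some v ∨ ∃ p ∈ acc, (PySem.Set.equal p.1 d && (p.2 != 0)) = true ∧ p.2 = v) := by
  induction acc with
  | nil => intro cur v h; simp only [List.foldl_nil] at h; subst h; simp
  | cons p rest ih =>
    intro cur v h
    rw [List.foldl_cons] at h
    by_cases hc : (PySem.Set.equal p.1 d && (p.2 != 0) && pvBetter cur p.2) = true
    · rw [if_pos hc] at h
      obtain ⟨hall, hcur, hmem⟩ := ih (some p.2) v h
      have hvp : v ≤ p.2 := hcur p.2 rfl
      simp only [Bool.and_eq_true] at hc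
      have hcond : (PySem.Set.equal p.1 d && (p.2 != 0)) = true := by
        simp [hc.1.1, hc.1.2]
      refine ⟨?_, ?_, ?_⟩
      · intro q hq hqc
        rcases List.mem_cons.mp hq with rfl | hq
        · exact hvp
        · exact hall q hq hqc
      · intro c hcur'
        subst hcur'
        have hb : p.2 < c := by simpa [pvBetter_some] using hc.2
        omega
      · rcases hmem with hm | ⟨q, hq, hqc, hqv⟩
        · exact Or.inr ⟨p, List.mem_cons_self, hcond, (Option.some_inj.mp hm).symm.symm⟩
        · exact Or.inr ⟨q, List.mem_cons_of_mem _ hq, hqc, hqv⟩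
    · rw [if_neg hc] at h
      obtain ⟨hall, hcur, hmem⟩ := ih cur v h
      refine ⟨?_, hcur, ?_⟩
      · intro q hq hqc
        rcases List.mem_cons.mp hq with rfl | hq
        · -- condition held but `pvBetter` failed: cur = some c with c ≤ q.2, and v ≤ c
          cases hcu : cur with
          | none =>
            rw [hcu] at hc
            exact absurd (show (PySem.Set.equal q.1 d && (q.2 != 0) && pvBetter none q.2) = true
              by simp [hqc, pvBetter_none]) hc
          | some c =>
            have hcle : c ≤ q.2 := by
              by_contra hlt
              rw [hcu] at hc
              exact hc (by simp [hqc, pvBetter_some]; omega)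
            have := hcur c hcu
            omega
        · exact hall q hq hqc
      · rcases hmem with hm | ⟨q, hq, hqc, hqv⟩
        · exact Or.inl hm
        · exact Or.inr ⟨q, List.mem_cons_of_mem _ hq, hqc, hqv⟩

theorem pv_best_none (d : PySem.Set Int) (acc : List (PySem.Set Int × Int)) :
    ∀ (cur : Option Int),
    acc.foldl (fun best p =>
        if PySem.Set.equal p.1 d && (p.2 != 0) && pvBetter best p.2 then some p.2 else best) cur
      = none →
    cur = none ∧ ∀ p ∈ acc, (PySem.Set.equal p.1 d && (p.2 != 0)) = false := by
  induction acc with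
  | nil => intro cur h; simpa using h
  | cons p rest ih =>
    intro cur h
    rw [List.foldl_cons] at h
    by_cases hc : (PySem.Set.equal p.1 d && (p.2 != 0) && pvBetter cur p.2) = true
    · rw [if_pos hc] at h
      exact absurd ((ih _ h).1) (by simp)
    · rw [if_neg hc] at h
      obtain ⟨hcur, hall⟩ := ih cur h
      subst hcur
      refine ⟨rfl, ?_⟩
      intro q hq
      rcases List.mem_cons.mp hq with rfl | hq
      · by_contra hne
        apply hc
        simp only [Bool.not_eq_false] at hne
        simp [hne, pvBetter_none]
      · exact hall q hq

theorem pv_find_some (n : Nat) :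
    ∀ (a k : Int) (p : Int → Bool),
    (PySem.List.pyRange a (a + n) 1).find? p = some k →
    a ≤ k ∧ k < a + n ∧ p k = true ∧ ∀ j, a ≤ j → j < k → p j = false := by
  induction n with
  | zero =>
    intro a k p h
    rw [PySem.List.pyRange_one_eq_nil (by omega)] at h
    simp at h
  | succ n ih =>
    intro a k p h
    rw [PySem.List.pyRange_one_cons (by omega)] at h
    by_cases hp : p a = true
    · rw [List.find?_cons_of_pos hp] at h
      obtain rfl := Option.some_inj.mp h
      exact ⟨le_refl _, by omega, hp, by omega⟩
    · rw [List.find?_cons_of_neg hp] at h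
      have h' : (PySem.List.pyRange (a+1) ((a+1) + n) 1).find? p = some k := by
        have : a + (n+1 : Nat) = (a+1) + (n : Nat) := by push_cast; ring
        rwa [this] at h
      obtain ⟨h1, h2, h3, h4⟩ := ih (a+1) k p h'
      refine ⟨by omega, by push_cast at h2 ⊢; omega, h3, ?_⟩
      intro j hj1 hj2
      by_cases hja : j = a
      · subst hja; simpa using hp
      · exact h4 j (by omega) hj2

theorem pv_acc_iff (_d : PySem.Set Int) (bs : List (PySem.Set Int)) (p : PySem.Set Int × Int) :
    p ∈ bs.foldl pvStep [(PySem.Set.empty, (0 : Int))] ↔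
      ∃ s : List (PySem.Set Int), s.Sublist bs ∧ p = (pvXor s, (s.length : Int)) := by
  rw [pv_mem_acc]
  constructor
  · rintro ⟨q, hq, s, hs, rfl⟩
    simp only [List.mem_singleton] at hq
    subst hq
    exact ⟨s, hs, by simp [pvXor]⟩
  · rintro ⟨s, hs, rfl⟩
    exact ⟨(PySem.Set.empty, 0), by simp, s, hs, by simp [pvXor]⟩

theorem pv_pred_of_sublist (d : PySem.Set Int) (bs : List (PySem.Set Int))
    (s : List (PySem.Set Int)) (hs : s.Sublist bs) (heq : PySem.Set.equal (pvXor s) d = true) :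
    ((pvCombos ((s.length : Int)).toNat bs).any (fun att => PySem.Set.equal (pvXor att) d)) = true := by
  rw [List.any_eq_true]
  refine ⟨s, ?_, heq⟩
  exact (pv_mem_combos _ bs s).mpr ⟨hs, by simp⟩

theorem pvLine_eq (d : PySem.Set Int) (bs : List (PySem.Set Int)) : pvLineA d bs = pvLineB d bs := by
  unfold pvLineA pvLineB
  cases hA : (PySem.List.pyRange 1 ((bs.length : Int) + 1) 1).find?
      (fun k => (pvCombos k.toNat bs).any (fun att => PySem.Set.equal (pvXor att) d)) with
  | none =>
    rw [List.find?_eq_none] at hA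
    cases hB : (bs.foldl pvStep [(PySem.Set.empty, (0 : Int))]).foldl
        (fun best p =>
          if PySem.Set.equal p.1 d && (p.2 != 0) && pvBetter best p.2 then some p.2 else best)
        none with
    | none => rfl
    | some v =>
      exfalso
      obtain ⟨hall, hcur, hmem⟩ := pv_best_le d _ none v hB
      rcases hmem with hm | ⟨p, hp, hcond, hpv⟩
      · simp at hm
      · obtain ⟨s, hs, rfl⟩ := (pv_acc_iff d bs p).mp hp
        simp only [Bool.and_eq_true, bne_iff_ne, ne_eq] at hcond
        have hlen : s.length ≠ 0 := by
          intro h0; exact hcond.2 (by simp [h0])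
        refine hA ((s.length : Int)) ?_ (pv_pred_of_sublist d bs s hs hcond.1)
        rw [PySem.List.mem_pyRange_one]
        have := hs.length_le
        omega
  | some k =>
    have hA' : (PySem.List.pyRange 1 (1 + (bs.length : Nat)) 1).find?
        (fun k => (pvCombos k.toNat bs).any (fun att => PySem.Set.equal (pvXor att) d)) = some k := by
      rw [show (1 : Int) + (bs.length : Nat) = (bs.length : Int) + 1 by ring]
      exact hA
    obtain ⟨hk1, hk2, hk3, hk4⟩ := pv_find_some bs.length 1 k _ hA'
    obtain ⟨att, hatt, heq⟩ := List.any_eq_true.mp hk3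
    obtain ⟨hsub, hlen⟩ := (pv_mem_combos k.toNat bs att).mp hatt
    have hkl : (att.length : Int) = k := by
      rw [hlen]; exact Int.toNat_of_nonneg (by omega)
    have hpacc : (pvXor att, (att.length : Int)) ∈ bs.foldl pvStep [(PySem.Set.empty, (0 : Int))] :=
      (pv_acc_iff d bs _).mpr ⟨att, hsub, rfl⟩
    have hcondA : (PySem.Set.equal (pvXor att) d && ((att.length : Int) != 0)) = true := by
      simp only [Bool.and_eq_true, bne_iff_ne, ne_eq]
      exact ⟨heq, by rw [hkl]; omega⟩
    cases hB : (bs.foldl pvStep [(PySem.Set.empty, (0 : Int))]).foldl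
        (fun best p =>
          if PySem.Set.equal p.1 d && (p.2 != 0) && pvBetter best p.2 then some p.2 else best)
        none with
    | none =>
      exfalso
      obtain ⟨_, hall⟩ := pv_best_none d _ none hB
      exact absurd hcondA (by rw [hall _ hpacc]; simp)
    | some v =>
      obtain ⟨hall, _, hmem⟩ := pv_best_le d _ none v hB
      have hvk : v ≤ k := by
        have := hall _ hpacc hcondA
        omega
      have hkv : k ≤ v := by
        rcases hmem with hm | ⟨p, hp, hcond, hpv⟩
        · simp at hm
        · obtain ⟨s, hs, rfl⟩ := (pv_acc_iff d bs p).mp hp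
          simp only at hpv
          simp only [Bool.and_eq_true, bne_iff_ne, ne_eq] at hcond
          have hlen0 : s.length ≠ 0 := by
            intro h0; exact hcond.2 (by simp [h0])
          by_contra hlt
          have hpred := pv_pred_of_sublist d bs s hs hcond.1
          have := hk4 ((s.length : Int)) (by omega) (by omega)
          rw [this] at hpred
          exact Bool.false_ne_true hpred
      rw [le_antisymm hvk hkv]

theorem main_fold (input : List (List Int × List (List Int) × Int)) :
    ∀ (l : List Int) (t : Int), t = l.sum →
    (input.foldl (fun fbp line =>
        match pvLineA (PySem.Set.ofList line.1) (line.2.1.map PySem.Set.ofList) with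
        | some k => fbp ++ [k]
        | none => fbp) l).sum
      = input.foldl (fun total line =>
          total + (pvLineB (PySem.Set.ofList line.1) (line.2.1.map PySem.Set.ofList)).getD 0) t := by
  induction input with
  | nil => intro l t ht; simpa using ht.symm
  | cons line rest ih =>
    intro l t ht
    simp only [List.foldl_cons]
    rw [← pvLine_eq]
    cases h : pvLineA (PySem.Set.ofList line.1) (line.2.1.map PySem.Set.ofList) with
    | none => simpa using ih l t ht
    | some k => simpa using ih (l ++ [k]) (t + k) (by simp [ht])

-- ===== VERDICT (by name: the statement is the Claim_ definition above) =====
theorem part_one_spec : Claim_equal_part_one := by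
  intro input _
  unfold Spec_part_one part_one part_one_alt
  exact main_fold input [] 0 rfl
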